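-- pv_equiv track=rewrite | github.com/driveathon/malicious-link-detector | detector/core.py | check_typosquatting
-- ===== SOURCE A (Python) =====
-- def levenshtein_distance(s1, s2):
--     """Calculate the Levenshtein distance between two strings."""
--     if len(s1) < len(s2):
--         return levenshtein_distance(s2, s1)
--
--     if len(s2) == 0:
--         return len(s1)
--
--     previous_row = range(len(s2) + 1)
--     for i, c1 in enumerate(s1):
--         current_row = [i + 1]
--         for j, c2 in enumerate(s2):
--             insertions = previous_row[j + 1] + 1
--             deletions = current_row[j] + 1
--             substitutions = previous_row[j] + (c1 != c2)
--             current_row.append(min(insertions, deletions, substitutions))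
--         previous_row = current_row
--
--     return previous_row[-1]
--
-- def check_typosquatting(domain, popular_domains, threshold=2):
--     """Check if the domain is a typosquatted version of a popular domain."""
--     # Strip common subdomains like 'www.'
--     if domain.startswith('www.'):
--         domain = domain[4:]
--
--     domain_part = domain.split('.')[0]
--     for target in popular_domains:
--         target_part = target.split('.')[0]
--         if domain_part != target_part:
--             distance = levenshtein_distance(domain_part, target_part)
--             if distance <= threshold:
--                 return True, target
--     return False, None
-- ===== SOURCE B (Python) =====
-- def _lev_le(s, t, k):
--     """Exact test levenshtein(s, t) <= k via a threshold-capped (Ukkonen banded)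
--     DP: cells outside the |i-j| <= k band are short-circuited to k+1, every cell
--     is capped at k+1, and a row whose minimum exceeds k aborts the target."""
--     if k < 0:
--         return False
--     n, m = len(s), len(t)
--     if abs(n - m) > k:
--         return False
--     INF = k + 1
--     prev = [j if j <= k else INF for j in range(m + 1)]
--     for i in range(1, n + 1):
--         cur = []
--         for j in range(m + 1):
--             if j + k < i or i + k < j:
--                 cur.append(INF)
--             elif j == 0:
--                 cur.append(i)
--             else:
--                 c = 0 if s[i - 1] == t[j - 1] else 1
--                 v = prev[j] + 1
--                 if cur[j - 1] + 1 < v: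
--                     v = cur[j - 1] + 1
--                 if prev[j - 1] + c < v:
--                     v = prev[j - 1] + c
--                 cur.append(v if v <= k else INF)
--         if min(cur) > k:
--             return False
--         prev = cur
--     return prev[m] <= k
--
-- def check_typosquatting(domain, popular_domains, threshold=2):
--     if domain.startswith('www.'):
--         domain = domain[4:]
--     domain_part = domain.split('.')[0]
--     for target in popular_domains:
--         target_part = target.split('.')[0]
--         if domain_part != target_part and _lev_le(domain_part, target_part, threshold):
--             return True, target
--     return False, None
-- ===== Notes on version B (the rewrite author's own statement) =====
-- stated objective: faster
-- what changed: Per target, B replaces A's unconditional full Wagner-Fischer DP (with its length-swap recursion) by a decision procedure for distance<=threshold: a length-difference prefilter, then a threshold-capped banded DP that short-circuits every cell outside the |i-j|<=k band to k+1, caps all values at k+1, and abandons a target as soon as a whole row exceeds the threshold.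
import Mathlib
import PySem

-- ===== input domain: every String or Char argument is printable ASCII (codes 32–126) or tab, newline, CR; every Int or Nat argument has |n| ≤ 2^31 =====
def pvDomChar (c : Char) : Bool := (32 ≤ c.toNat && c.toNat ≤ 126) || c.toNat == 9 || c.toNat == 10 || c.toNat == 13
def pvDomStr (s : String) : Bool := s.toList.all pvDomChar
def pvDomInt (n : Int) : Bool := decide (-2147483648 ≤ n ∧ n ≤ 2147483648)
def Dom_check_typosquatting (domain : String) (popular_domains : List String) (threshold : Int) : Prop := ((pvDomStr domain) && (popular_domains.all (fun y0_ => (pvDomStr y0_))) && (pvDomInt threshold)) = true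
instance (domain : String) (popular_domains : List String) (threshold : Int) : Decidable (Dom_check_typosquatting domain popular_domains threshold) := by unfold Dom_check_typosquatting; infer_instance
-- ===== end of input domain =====

-- B replaces A's full per-target Levenshtein DP by a length-difference prefilter plus a
-- threshold-capped banded DP (cells outside the |i-j| ≤ k band short-circuited, rows
-- abandoned once their minimum exceeds the threshold); return values proved identical.

-- ===== PORT A =====

-- inner loop of levenshtein_distance: 'for j, c2 in enumerate(s2)' building current_row
-- (indices prev[j], prev[j+1], current_row[j] are always in range; getD is exact there)
def levInner (c1 : Char) (prev : List Nat) : List Char → Nat → List Nat → List Nat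
  | [], _, cur => cur
  | c2 :: rest, j, cur =>
      levInner c1 prev rest (j + 1)
        (cur ++ [Nat.min (Nat.min (prev.getD (j + 1) 0 + 1) (cur.getD j 0 + 1))
                         (prev.getD j 0 + (if c1 ≠ c2 then 1 else 0))])

-- outer loop: 'for i, c1 in enumerate(s1)'
def levOuter (s2 : List Char) : List Char → Nat → List Nat → List Nat
  | [], _, prev => prev
  | c1 :: rest, i, prev => levOuter s2 rest (i + 1) (levInner c1 prev s2 0 [i + 1])

-- body of levenshtein_distance after the one possible swap
def levAux (s1 s2 : List Char) : Nat :=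
  if s2.length = 0 then s1.length
  else (levOuter s2 s1 0 (List.range (s2.length + 1))).getLastD 0

-- the recursive call swaps once, then never again
def levenshtein_distance (s1 s2 : List Char) : Nat :=
  if s1.length < s2.length then levAux s2 s1 else levAux s1 s2

-- 'for target in popular_domains' with early return
def ctLoopA (dp : String) (threshold : Int) : List String → Bool × Option String
  | [] => (false, none)
  | target :: rest =>
      let tp := ((PySem.Str.split? target ".").getD []).headD ""
      if dp ≠ tp then
        if (levenshtein_distance dp.toList tp.toList : Int) ≤ threshold then (true, some target)
        else ctLoopA dp threshold rest
      else ctLoopA dp threshold rest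

def check_typosquatting (domain : String) (popular_domains : List String) (threshold : Int) : Bool × Option String :=
  let domain := if PySem.Str.startswith domain "www." then PySem.Str.slice domain (some 4) none else domain
  -- split('.') with the literal nonempty separator never raises, and never returns []
  let domain_part := ((PySem.Str.split? domain ".").getD []).headD ""
  ctLoopA domain_part threshold popular_domains

-- ===== PORT B =====

-- inner loop of _lev_le: 'for j in range(m+1)' — band shortcut, then the capped cell
def bandInner (s t : List Char) (kk i : Nat) (prev : List Nat) : List Nat → List Nat → List Nat
  | [], cur => cur
  | j :: js, cur =>
      let cell : Nat :=
        if j + kk < i ∨ i + kk < j then kk + 1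
        else if j = 0 then i
        else
          let c : Nat := if s.getD (i - 1) 'a' = t.getD (j - 1) 'a' then 0 else 1
          let v0 := prev.getD j 0 + 1
          let v1 := if cur.getD (j - 1) 0 + 1 < v0 then cur.getD (j - 1) 0 + 1 else v0
          let v2 := if prev.getD (j - 1) 0 + c < v1 then prev.getD (j - 1) 0 + c else v1
          if v2 ≤ kk then v2 else kk + 1
      bandInner s t kk i prev js (cur ++ [cell])

-- outer loop of _lev_le: 'for i in range(1, n+1)' with 'if min(cur) > k: return False'
def bandOuter (s t : List Char) (kk : Nat) : List Nat → List Nat → Bool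
  | [], prev => decide (prev.getD t.length 0 ≤ kk)
  | i :: is_, prev =>
      let cur := bandInner s t kk i prev (List.range (t.length + 1)) []
      if kk < (PySem.List.min? cur (fun x => x)).getD 0 then false
      else bandOuter s t kk is_ cur

def lev_le (s t : List Char) (k : Int) : Bool :=
  if k < 0 then false
  else if (k : Int) < (((s.length : Int) - (t.length : Int)).natAbs : Int) then false
  else
    bandOuter s t k.toNat (List.range' 1 s.length)
      ((List.range (t.length + 1)).map (fun j => if j ≤ k.toNat then j else k.toNat + 1))

-- 'for target in popular_domains' with the conjunction guard of Source B
def ctLoopB (dp : String) (threshold : Int) : List String → Bool × Option String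
  | [] => (false, none)
  | target :: rest =>
      let tp := ((PySem.Str.split? target ".").getD []).headD ""
      if (!(dp == tp)) && lev_le dp.toList tp.toList threshold then (true, some target)
      else ctLoopB dp threshold rest

def check_typosquatting_alt (domain : String) (popular_domains : List String) (threshold : Int) : Bool × Option String :=
  let domain := if PySem.Str.startswith domain "www." then PySem.Str.slice domain (some 4) none else domain
  let domain_part := ((PySem.Str.split? domain ".").getD []).headD ""
  ctLoopB domain_part threshold popular_domains

-- ===== PRECONDITION & SPEC =====
def Spec_check_typosquatting (domain : String) (popular_domains : List String) (threshold : Int) (out : Bool × Option String) : Prop := out = check_typosquatting_alt domain popular_domains threshold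
instance (domain : String) (popular_domains : List String) (threshold : Int) (out : Bool × Option String) : Decidable (Spec_check_typosquatting domain popular_domains threshold out) := by unfold Spec_check_typosquatting; infer_instance

-- ===== CLAIM (what is proved, stated in full; the proofs are below) =====
def Claim_equal_check_typosquatting : Prop := ∀ (domain : String) (popular_domains : List String) (threshold : Int), Dom_check_typosquatting domain popular_domains threshold → Spec_check_typosquatting domain popular_domains threshold (check_typosquatting domain popular_domains threshold)

-- ===== LEMMAS AND PROOFS =====

-- the Levenshtein prefix-distance table both programs tabulate
def D (s t : List Char) : Nat → Nat → Nat
  | 0, j => j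
  | i + 1, 0 => i + 1
  | i + 1, j + 1 =>
      Nat.min (Nat.min (D s t i (j + 1) + 1) (D s t (i + 1) j + 1))
              (D s t i j + (if s.getD i 'a' ≠ t.getD j 'a' then 1 else 0))
termination_by i j => (i, j)

lemma D_right_zero (s t : List Char) (i : Nat) : D s t i 0 = i := by
  cases i <;> simp [D]

lemma D_symm (s t : List Char) : ∀ i j, D s t i j = D t s j i := by
  intro i
  induction i with
  | zero => intro j; rw [show D s t 0 j = j from by simp [D], D_right_zero]
  | succ i ih =>
    intro j
    induction j with
    | zero => rw [D_right_zero]; simp [D]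
    | succ j ihj =>
      have hc : (if t.getD j 'a' ≠ s.getD i 'a' then (1 : Nat) else 0)
          = (if s.getD i 'a' ≠ t.getD j 'a' then (1 : Nat) else 0) := by
        simp [ne_comm]
      simp only [D]
      rw [ih (j + 1), ihj, ih j, hc]
      simp only [Nat.min_def]
      split_ifs <;> omega

lemma D_ge_diff (s t : List Char) : ∀ i j, i ≤ D s t i j + j ∧ j ≤ D s t i j + i := by
  intro i
  induction i with
  | zero => intro j; simp [D]
  | succ i ih =>
    intro j
    induction j with
    | zero => rw [D_right_zero]; omega
    | succ j ihj =>
      have h1 := ih (j + 1)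
      have h2 := ih j
      simp only [D, Nat.min_def]
      split_ifs <;> omega

lemma getLastD_map_range (f : Nat → Nat) (n : Nat) :
    ((List.range (n + 1)).map f).getLastD 0 = f n := by
  rw [List.range_succ, List.map_append]
  exact List.getLastD_concat

lemma map_range_D_zero (s t : List Char) (n : Nat) :
    (List.range (n + 1)).map (D s t 0) = List.range (n + 1) := by
  have h : ∀ x ∈ List.range (n + 1), D s t 0 x = x := fun x _ => by simp [D]
  rw [List.map_congr_left h]
  simp

lemma levInner_inv (s t : List Char) (i : Nat) :
    ∀ (rest : List Char) (j : Nat) (cur : List Nat), rest = t.drop j → j ≤ t.length →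
      cur = (List.range (j + 1)).map (D s t (i + 1)) →
      levInner (s.getD i 'a') ((List.range (t.length + 1)).map (D s t i)) rest j cur
        = (List.range (t.length + 1)).map (D s t (i + 1)) := by
  intro rest
  induction rest with
  | nil =>
    intro j cur hr hj hc
    have hlen := congrArg List.length hr
    simp [List.length_drop] at hlen
    have : j = t.length := by omega
    subst this
    simpa [levInner] using hc
  | cons c2 r2 ih =>
    intro j cur hr hj hc
    have hlen := congrArg List.length hr
    simp [List.length_drop] at hlen
    have hjlt : j < t.length := by omega
    have hsplit : t[j] :: t.drop (j + 1) = t.drop j := List.getElem_cons_drop hjlt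
    rw [← hsplit] at hr
    obtain ⟨hc2, hr2⟩ : c2 = t[j] ∧ r2 = t.drop (j + 1) := by
      refine ⟨?_, ?_⟩ <;> injection hr with h1 h2
    have hgd : t.getD j 'a' = t[j] := List.getD_eq_getElem t 'a' hjlt
    rw [levInner]
    refine ih (j + 1) _ hr2 (by omega) ?_
    rw [hc]
    rw [PySem.List.getD_map_range (D s t i) (t.length + 1) (j + 1) 0 (by omega),
        PySem.List.getD_map_range (D s t (i + 1)) (j + 1) j 0 (by omega),
        PySem.List.getD_map_range (D s t i) (t.length + 1) j 0 (by omega)]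
    have hval : Nat.min (Nat.min (D s t i (j + 1) + 1) (D s t (i + 1) j + 1))
        (D s t i j + (if s.getD i 'a' ≠ c2 then 1 else 0)) = D s t (i + 1) (j + 1) := by
      rw [hc2, ← hgd]; simp [D]
    rw [hval, show List.range (j + 1 + 1) = List.range (j + 1) ++ [j + 1] from List.range_succ]
    simp

lemma levOuter_inv (s t : List Char) :
    ∀ (rest : List Char) (i : Nat) (prev : List Nat), rest = s.drop i → i ≤ s.length →
      prev = (List.range (t.length + 1)).map (D s t i) →
      levOuter t rest i prev = (List.range (t.length + 1)).map (D s t s.length) := by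
  intro rest
  induction rest with
  | nil =>
    intro i prev hr hi hp
    have hlen := congrArg List.length hr
    simp [List.length_drop] at hlen
    have : i = s.length := by omega
    subst this
    simpa [levOuter] using hp
  | cons c1 r1 ih =>
    intro i prev hr hi hp
    have hlen := congrArg List.length hr
    simp [List.length_drop] at hlen
    have hilt : i < s.length := by omega
    have hsplit : s[i] :: s.drop (i + 1) = s.drop i := List.getElem_cons_drop hilt
    rw [← hsplit] at hr
    obtain ⟨hc1, hr1⟩ : c1 = s[i] ∧ r1 = s.drop (i + 1) := by
      refine ⟨?_, ?_⟩ <;> injection hr with h1 h2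
    have hgd : s.getD i 'a' = s[i] := List.getD_eq_getElem s 'a' hilt
    rw [levOuter]
    refine ih (i + 1) _ hr1 (by omega) ?_
    rw [hp, hc1, ← hgd]
    rw [levInner_inv s t i t 0 [i + 1] rfl (by omega)
        (by simp [show D s t (i + 1) 0 = i + 1 from D_right_zero s t (i + 1)])]

lemma levAux_eq (s t : List Char) : levAux s t = D s t s.length t.length := by
  unfold levAux
  by_cases ht : t.length = 0
  · rw [if_pos ht, ht, D_right_zero]
  · rw [if_neg ht,
        levOuter_inv s t s 0 _ rfl (by omega) (by rw [map_range_D_zero]),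
        getLastD_map_range]

lemma lev_eq (s t : List Char) : levenshtein_distance s t = D s t s.length t.length := by
  unfold levenshtein_distance
  split_ifs with h
  · rw [levAux_eq, D_symm]
  · exact levAux_eq s t

-- once every entry of row j is ≥ b, every later cell (within the column range) is ≥ b
lemma D_row_lb (u v : List Char) (j b : Nat) (h : ∀ i, i ≤ v.length → b ≤ D u v j i) :
    ∀ j', j ≤ j' → ∀ i, i ≤ v.length → b ≤ D u v j' i := by
  intro j' hj
  induction j', hj using Nat.le_induction with
  | base => exact h
  | succ j' hj ih =>
    intro i hi
    induction i with
    | zero =>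
      have h0 := ih 0 (by omega)
      rw [D_right_zero] at h0 ⊢
      omega
    | succ i ihi =>
      have h1 := ih (i + 1) hi
      have h2 := ihi (by omega)
      have h3 := ih i (by omega)
      simp only [D, Nat.min_def]
      split_ifs <;> omega

-- the cell arithmetic of B's capped chain of ifs equals the capped true recurrence
lemma bandCell_eq (a b c χ kk : Nat) :
    (if (if Nat.min c (kk + 1) + χ <
            (if Nat.min b (kk + 1) + 1 < Nat.min a (kk + 1) + 1
             then Nat.min b (kk + 1) + 1 else Nat.min a (kk + 1) + 1)
         then Nat.min c (kk + 1) + χ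
         else (if Nat.min b (kk + 1) + 1 < Nat.min a (kk + 1) + 1
               then Nat.min b (kk + 1) + 1 else Nat.min a (kk + 1) + 1)) ≤ kk
     then (if Nat.min c (kk + 1) + χ <
              (if Nat.min b (kk + 1) + 1 < Nat.min a (kk + 1) + 1
               then Nat.min b (kk + 1) + 1 else Nat.min a (kk + 1) + 1)
           then Nat.min c (kk + 1) + χ
           else (if Nat.min b (kk + 1) + 1 < Nat.min a (kk + 1) + 1
                 then Nat.min b (kk + 1) + 1 else Nat.min a (kk + 1) + 1))
     else kk + 1)
    = Nat.min (Nat.min (Nat.min (a + 1) (b + 1)) (c + χ)) (kk + 1) := by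
  simp only [Nat.min_def]
  split_ifs <;> omega

-- B's row, capped at kk+1: entry j of row i is min (D s t i j) (kk+1)
lemma bandInner_inv (s t : List Char) (kk i : Nat) (hi1 : 1 ≤ i) (hin : i ≤ s.length) :
    ∀ (js : List Nat) (j : Nat) (cur : List Nat),
      js = List.range' j (t.length + 1 - j) → j ≤ t.length + 1 →
      cur = (List.range j).map (fun jj => Nat.min (D s t i jj) (kk + 1)) →
      bandInner s t kk i ((List.range (t.length + 1)).map (fun jj => Nat.min (D s t (i - 1) jj) (kk + 1))) js cur
        = (List.range (t.length + 1)).map (fun jj => Nat.min (D s t i jj) (kk + 1)) := by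
  intro js
  induction js with
  | nil =>
    intro j cur hr hj hc
    have hlen := congrArg List.length hr
    simp [List.length_range'] at hlen
    have : j = t.length + 1 := by omega
    subst this
    simpa [bandInner] using hc
  | cons j0 js ih =>
    intro j cur hr hj hc
    have hpos : t.length + 1 - j ≠ 0 := by
      intro h0; rw [h0] at hr; simp at hr
    have hjle : j ≤ t.length := by omega
    rw [show t.length + 1 - j = (t.length - j) + 1 from by omega, List.range'_succ] at hr
    obtain ⟨hj0, hjs⟩ : j0 = j ∧ js = List.range' (j + 1) (t.length - j) := by
      refine ⟨?_, ?_⟩ <;> injection hr with h1 h2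
    rw [hj0]
    rw [bandInner]
    have hstep : ∀ cell, cell = Nat.min (D s t i j) (kk + 1) →
        bandInner s t kk i ((List.range (t.length + 1)).map (fun jj => Nat.min (D s t (i - 1) jj) (kk + 1))) js (cur ++ [cell])
          = (List.range (t.length + 1)).map (fun jj => Nat.min (D s t i jj) (kk + 1)) := by
      intro cell hcell
      refine ih (j + 1) _ (by rw [hjs]; congr 1; omega) (by omega) ?_
      rw [hc, hcell, show List.range (j + 1) = List.range j ++ [j] from List.range_succ]
      simp
    refine hstep _ ?_
    by_cases hband : j + kk < i ∨ i + kk < j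
    · rw [if_pos hband]
      have hd := D_ge_diff s t i j
      rcases hband with h | h <;> simp only [Nat.min_def] <;> split_ifs <;> omega
    · rw [if_neg hband]
      by_cases hj0 : j = 0
      · subst hj0
        rw [if_pos rfl, D_right_zero]
        push Not at hband
        simp only [Nat.min_def]
        split_ifs <;> omega
      · rw [if_neg hj0]
        obtain ⟨j', rfl⟩ : ∃ j', j = j' + 1 := ⟨j - 1, by omega⟩
        obtain ⟨i', rfl⟩ : ∃ i', i = i' + 1 := ⟨i - 1, by omega⟩
        simp only [Nat.add_sub_cancel]
        rw [PySem.List.getD_map_range _ (t.length + 1) (j' + 1) 0 (by omega),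
            PySem.List.getD_map_range _ (t.length + 1) j' 0 (by omega),
            hc, PySem.List.getD_map_range _ (j' + 1) j' 0 (by omega)]
        have hχ : (if s.getD i' 'a' = t.getD j' 'a' then (0:Nat) else 1)
            = (if s.getD i' 'a' ≠ t.getD j' 'a' then (1:Nat) else 0) := by
          by_cases h : s.getD i' 'a' = t.getD j' 'a' <;> simp [h]
        rw [hχ]
        rw [show D s t (i' + 1) (j' + 1)
              = Nat.min (Nat.min (D s t i' (j' + 1) + 1) (D s t (i' + 1) j' + 1))
                  (D s t i' j' + (if s.getD i' 'a' ≠ t.getD j' 'a' then 1 else 0)) from by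
            simp [D]]
        exact bandCell_eq (D s t i' (j' + 1)) (D s t (i' + 1) j') (D s t i' j') _ kk

lemma bandOuter_inv (s t : List Char) (kk : Nat) :
    ∀ (is_ : List Nat) (i : Nat) (prev : List Nat),
      is_ = List.range' i (s.length + 1 - i) → 1 ≤ i → i ≤ s.length + 1 →
      prev = (List.range (t.length + 1)).map (fun jj => Nat.min (D s t (i - 1) jj) (kk + 1)) →
      (bandOuter s t kk is_ prev = true ↔ D s t s.length t.length ≤ kk) := by
  intro is_
  induction is_ with
  | nil =>
    intro i prev hr hi1 hi hp
    have hlen := congrArg List.length hr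
    simp [List.length_range'] at hlen
    have : i = s.length + 1 := by omega
    subst this
    rw [hp, bandOuter, PySem.List.getD_map_range _ (t.length + 1) t.length 0 (by omega)]
    simp only [Nat.add_sub_cancel, decide_eq_true_iff]
    simp only [Nat.min_def]
    split_ifs <;> omega
  | cons i0 is_ ih =>
    intro i prev hr hi1 hi hp
    have hpos : s.length + 1 - i ≠ 0 := by
      intro h0; rw [h0] at hr; simp at hr
    have hile : i ≤ s.length := by omega
    rw [show s.length + 1 - i = (s.length - i) + 1 from by omega, List.range'_succ] at hr
    obtain ⟨hi0, his⟩ : i0 = i ∧ is_ = List.range' (i + 1) (s.length - i) := by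
      refine ⟨?_, ?_⟩ <;> injection hr with h1 h2
    rw [hi0]
    rw [bandOuter]
    have hcur : bandInner s t kk i ((List.range (t.length + 1)).map (fun jj => Nat.min (D s t (i - 1) jj) (kk + 1))) (List.range (t.length + 1)) []
        = (List.range (t.length + 1)).map (fun jj => Nat.min (D s t i jj) (kk + 1)) := by
      exact bandInner_inv s t kk i hi1 hile (List.range (t.length + 1)) 0 []
        (by simp [List.range_eq_range']) (by omega) (by simp)
    rw [hp, hcur]
    have hne : (List.range (t.length + 1)).map (fun jj => Nat.min (D s t i jj) (kk + 1)) ≠ [] := by simp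
    obtain ⟨mval, hm⟩ : ∃ m, PySem.List.min? ((List.range (t.length + 1)).map (fun jj => Nat.min (D s t i jj) (kk + 1))) (fun x => x) = some m := by
      cases hmm : PySem.List.min? ((List.range (t.length + 1)).map (fun jj => Nat.min (D s t i jj) (kk + 1))) (fun x => x) with
      | none => exact absurd ((PySem.List.min?_eq_none_iff _ _).mp hmm) hne
      | some m => exact ⟨m, rfl⟩
    rw [hm]
    split_ifs with hk
    · -- early exit: every entry of row i exceeds kk, hence so does the final cell
      simp only [Option.getD_some] at hk
      have hrow : ∀ jj, jj ≤ t.length → kk + 1 ≤ D s t i jj := by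
        intro jj hjj
        have hmem : Nat.min (D s t i jj) (kk + 1)
            ∈ (List.range (t.length + 1)).map (fun jj => Nat.min (D s t i jj) (kk + 1)) :=
          List.mem_map_of_mem (List.mem_range.mpr (by omega))
        have h1 := PySem.List.min?_isMin hm _ hmem
        have h2 : kk < Nat.min (D s t i jj) (kk + 1) := lt_of_lt_of_le hk h1
        simp only [Nat.min_def] at h2
        split_ifs at h2 <;> omega
      have hfin : kk + 1 ≤ D s t s.length t.length :=
        D_row_lb s t i (kk + 1) hrow s.length (by omega) t.length (by omega)
      simp only [false_iff]
      omega
    · exact ih (i + 1) _ (by rw [his]; congr 1; omega) (by omega) (by omega)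
        (by simp only [Nat.add_sub_cancel])

lemma lev_le_iff (s t : List Char) (k : Int) :
    lev_le s t k = true ↔ ((D s t s.length t.length : Nat) : Int) ≤ k := by
  unfold lev_le
  split_ifs with hneg habs
  · simp only [false_iff]
    intro h
    have : (0 : Int) ≤ ((D s t s.length t.length : Nat) : Int) := Int.natCast_nonneg _
    omega
  · -- prefilter: D ≥ |n - m| > k
    have hd := D_ge_diff s t s.length t.length
    simp only [false_iff]
    intro h
    have habs' : (((s.length : Int) - (t.length : Int)).natAbs : Int)
        ≤ ((D s t s.length t.length : Nat) : Int) := by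
      have h1 := hd.1
      have h2 := hd.2
      rw [Int.natCast_natAbs]
      rw [abs_le]
      constructor <;> omega
    omega
  · have hstart : (List.range (t.length + 1)).map (fun j => if j ≤ k.toNat then j else k.toNat + 1)
        = (List.range (t.length + 1)).map (fun jj => Nat.min (D s t 0 jj) (k.toNat + 1)) := by
      refine List.map_congr_left fun x _ => ?_
      rw [show D s t 0 x = x from by simp [D]]
      simp only [Nat.min_def]
      split_ifs <;> omega
    rw [hstart,
        bandOuter_inv s t k.toNat (List.range' 1 s.length) 1 _
          (by simp) (by omega) (by omega) (by simp)]
    omega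

lemma loops_eq (dp : String) (th : Int) :
    ∀ ts, ctLoopA dp th ts = ctLoopB dp th ts := by
  intro ts
  induction ts with
  | nil => rfl
  | cons target rest ih =>
    simp only [ctLoopA, ctLoopB]
    by_cases hdp : dp = ((PySem.Str.split? target ".").getD []).headD ""
    · rw [if_neg (by simp [hdp]), if_neg (by simp [hdp]), ih]
    · rw [if_pos hdp]
      set tp := ((PySem.Str.split? target ".").getD []).headD "" with htp
      have hlev : levenshtein_distance dp.toList tp.toList
          = D dp.toList tp.toList dp.toList.length tp.toList.length := lev_eq _ _
      by_cases hle : ((D dp.toList tp.toList dp.toList.length tp.toList.length : Nat) : Int) ≤ th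
      · rw [if_pos (by rw [hlev]; exact_mod_cast hle),
            if_pos (by simp [hdp, (lev_le_iff _ _ _).mpr hle])]
      · rw [if_neg (by rw [hlev]; exact_mod_cast hle),
            if_neg (by
              simp only [Bool.and_eq_true, Bool.not_eq_true']
              intro hcontr
              exact hle ((lev_le_iff _ _ _).mp hcontr.2)), ih]

-- ===== VERDICT (by name: the statement is the Claim_ definition above) =====
theorem check_typosquatting_spec : Claim_equal_check_typosquatting := by
  intro domain popular_domains threshold _
  unfold Spec_check_typosquatting check_typosquatting check_typosquatting_alt
  exact loops_eq _ threshold popular_domains
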